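-- pv_equiv track=rewrite | github.com/BraffZacklin/TokiPona | toki.py | getSound
-- ===== SOURCE A (Python) =====
-- def getSound(word):
-- 	vowels = ['a', 'e', 'i', 'o', 'u']
-- 	assert type(word) == str
-- 	length = len(word)
-- 	assert length > 0
-- 	sound = []
--
-- 	if length <= 2:
-- 		sound = [word]
-- 	elif length % 2 == 0:
-- 		if word[0] in vowels and word[-1] not in vowels:
-- 			if length == 3:
-- 				sound = [word]
-- 			elif length == 4:
-- 				sound.append(word[0])
-- 				sound.append(word[::-1][0:3][::-1])
-- 			else:
-- 				sound.append(word[0])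
-- 				for index in range(1,length-4,2):
-- 					sound.append(word[index] + word[index+1])
-- 				sound.append(word[::-1][0:3][::-1])
-- 		else:
-- 			for index in range(0,length-1,2):
-- 				sound.append(word[index] + word[index+1])
-- 	else:
-- 		if word[0] in vowels:
-- 			sound.append(word[0])
-- 			for index in range(1,length-1,2):
-- 				sound.append(word[index] + word[index+1])
-- 		else:
-- 			for index in range(0,length-4,2):
-- 				sound.append(word[index] + word[index+1])
-- 			sound.append(word[::-1][0:3][::-1])
--
-- 	return sound
-- ===== SOURCE B (Python) =====
-- def getSound(word):
-- 	vowels = ['a', 'e', 'i', 'o', 'u']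
-- 	assert type(word) == str
-- 	length = len(word)
-- 	assert length > 0
-- 	if length <= 2:
-- 		return [word]
-- 	lead = word[0] in vowels and (length % 2 == 1 or word[-1] not in vowels)
-- 	sound = []
-- 	i = 0
-- 	if lead:
-- 		sound.append(word[0])
-- 		i = 1
-- 	while i < length:
-- 		if length - i == 3:
-- 			sound.append(word[i:i+3])
-- 			i += 3
-- 		else:
-- 			sound.append(word[i:i+2])
-- 			i += 2
-- 	return sound
-- ===== Notes on version B (the rewrite author's own statement) =====
-- stated objective: simpler
-- what changed: Replaces A's six-way parity/leading-vowel branch tree (with four separate range loops and reverse-slice tricks) by one consolidated leading-vowel test followed by a single chunking loop that takes 3 characters when exactly 3 remain and 2 otherwise.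
import Mathlib
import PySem

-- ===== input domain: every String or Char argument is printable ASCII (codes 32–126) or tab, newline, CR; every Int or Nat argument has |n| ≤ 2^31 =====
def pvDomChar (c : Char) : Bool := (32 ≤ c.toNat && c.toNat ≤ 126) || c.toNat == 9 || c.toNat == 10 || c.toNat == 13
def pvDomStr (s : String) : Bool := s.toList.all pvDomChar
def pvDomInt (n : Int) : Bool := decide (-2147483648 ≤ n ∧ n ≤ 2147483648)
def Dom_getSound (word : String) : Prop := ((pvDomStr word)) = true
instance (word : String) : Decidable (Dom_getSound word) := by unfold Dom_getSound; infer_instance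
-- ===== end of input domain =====

-- B replaces A's six-way parity/vowel branch tree by one leading-vowel test plus a single
-- chunking loop (take 3 when exactly 3 remain, else take 2); objective: simpler.

-- ===== PORT A =====
def pvVowels : List Char := ['a', 'e', 'i', 'o', 'u']

-- word[i]; under Pre_getSound every index A evaluates is in range, so the ' ' default is never the result
def pyGetC (l : List Char) (i : Int) : Char := (PySem.List.pyGet? l i).getD ' '

-- word[::-1][0:3][::-1]  (the two [::-1] slices via slice?, which is some-valued for step -1)
def pvLast3 (l : List Char) : String :=
  let r := (PySem.List.slice? l none none (-1)).getD []
  let t := PySem.List.slice r (some 0) (some 3)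
  String.ofList ((PySem.List.slice? t none none (-1)).getD [])

-- word[index] + word[index+1]
def pvPair (l : List Char) (i : Int) : String := String.ofList [pyGetC l i, pyGetC l (i + 1)]

def getSound (word : String) : List String :=
  let l := word.toList
  let length : Int := l.length
  if length ≤ 2 then [word]
  else if length % 2 = 0 then
    if pyGetC l 0 ∈ pvVowels ∧ pyGetC l (-1) ∉ pvVowels then
      if length = 3 then [word]
      else if length = 4 then [String.ofList [pyGetC l 0], pvLast3 l]
      else
        ((PySem.List.pyRange 1 (length - 4) 2).foldl
            (fun s i => s ++ [pvPair l i]) [String.ofList [pyGetC l 0]]) ++ [pvLast3 l]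
    else
      (PySem.List.pyRange 0 (length - 1) 2).foldl (fun s i => s ++ [pvPair l i]) []
  else
    if pyGetC l 0 ∈ pvVowels then
      (PySem.List.pyRange 1 (length - 1) 2).foldl
        (fun s i => s ++ [pvPair l i]) [String.ofList [pyGetC l 0]]
    else
      ((PySem.List.pyRange 0 (length - 4) 2).foldl (fun s i => s ++ [pvPair l i]) [])
        ++ [pvLast3 l]

-- ===== PORT B =====
-- Source B's while loop: the unprocessed suffix word[i:] is the argument; 'exactly 3 left' takes 3, else 2
def pvChunks (l : List Char) : List String :=
  match l with
  | [] => []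
  | c :: rest =>
    if rest.length = 2 then [String.ofList (c :: rest)]
    else String.ofList ((c :: rest).take 2) :: pvChunks (rest.drop 1)
termination_by l.length
decreasing_by simp

def getSound_alt (word : String) : List String :=
  let l := word.toList
  let length : Int := l.length
  if length ≤ 2 then [word]
  else
    if pyGetC l 0 ∈ pvVowels ∧ (length % 2 = 1 ∨ pyGetC l (-1) ∉ pvVowels) then
      String.ofList [pyGetC l 0] :: pvChunks (l.drop 1)
    else
      pvChunks l

-- ===== PRECONDITION & SPEC =====
-- A raises AssertionError on the empty string; everything else returns normally.
def Pre_getSound (word : String) : Prop := word ≠ ""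
instance (word : String) : Decidable (Pre_getSound word) := by unfold Pre_getSound; infer_instance
def pvWitness_getSound : String := "toki"

def Spec_getSound (word : String) (out : List String) : Prop := out = getSound_alt word
instance (word : String) (out : List String) : Decidable (Spec_getSound word out) := by
  unfold Spec_getSound; infer_instance

-- ===== CLAIM (what is proved, stated in full; the proofs are below) =====
def Claim_equal_getSound : Prop :=
  ∀ (word : String), Dom_getSound word → Pre_getSound word → Spec_getSound word (getSound word)

-- ===== LEMMAS AND PROOFS =====

theorem pr2_nil (a b : Int) (h : b ≤ a) : PySem.List.pyRange a b 2 = [] := by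
  rw [PySem.List.pyRange_of_pos _ _ (by norm_num : (0:Int) < 2), if_neg (by omega)]
  simp

theorem pr2_cons (a b : Int) (h : a < b) :
    PySem.List.pyRange a b 2 = a :: PySem.List.pyRange (a + 2) b 2 := by
  rw [PySem.List.pyRange_of_pos _ _ (by norm_num : (0:Int) < 2),
      PySem.List.pyRange_of_pos _ _ (by norm_num : (0:Int) < 2), if_pos h]
  by_cases h2 : a + 2 < b
  · rw [if_pos h2, show ((b - a + 2 - 1) / 2).toNat = ((b - (a + 2) + 2 - 1) / 2).toNat + 1 by omega,
        List.range_succ_eq_map]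
    simp only [List.map_cons, List.map_map, Nat.cast_zero, mul_zero, add_zero]
    refine congrArg _ ?_
    refine List.map_congr_left fun k _ => ?_
    simp only [Function.comp_apply]
    push_cast
    ring
  · rw [if_neg h2, show ((b - a + 2 - 1) / 2).toNat = 1 by omega]
    simp

theorem pyGetC_zero (c : Char) (rest : List Char) : pyGetC (c :: rest) 0 = c := by
  simp [pyGetC]

theorem pyGetC_shift (c : Char) (rest : List Char) (a : Int) (ha : 0 ≤ a) :
    pyGetC (c :: rest) (a + 1) = pyGetC rest a := by
  unfold pyGetC
  rw [show a = ((a.toNat : Nat) : Int) by omega, PySem.List.pyGet?_cons_succ]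

theorem pvPair_shift (c : Char) (rest : List Char) (a : Int) (ha : 0 ≤ a) :
    pvPair (c :: rest) (a + 1) = pvPair rest a := by
  unfold pvPair
  rw [pyGetC_shift c rest a ha, show a + 1 + 1 = (a + 1) + 1 by ring,
      pyGetC_shift c rest (a + 1) (by omega)]

theorem pvPair_zero (c c2 : Char) (rest : List Char) :
    pvPair (c :: c2 :: rest) 0 = String.ofList [c, c2] := by
  unfold pvPair
  rw [pyGetC_zero, show (0:Int) + 1 = ((0:Nat):Int) + 1 by norm_num]
  unfold pyGetC
  rw [PySem.List.pyGet?_cons_succ]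
  simp

theorem mapPair_shift1 (c : Char) (rest : List Char) (a b : Int) (ha : 0 ≤ a) :
    (PySem.List.pyRange (a + 1) (b + 1) 2).map (pvPair (c :: rest)) =
      (PySem.List.pyRange a b 2).map (pvPair rest) := by
  by_cases h : a < b
  · rw [pr2_cons _ _ h, pr2_cons _ _ (by omega : a + 1 < b + 1)]
    simp only [List.map_cons]
    rw [pvPair_shift c rest a ha, show a + 1 + 2 = (a + 2) + 1 by ring]
    exact congrArg _ (mapPair_shift1 c rest (a + 2) b (by omega))
  · rw [pr2_nil _ _ (by omega), pr2_nil _ _ (by omega)]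
    rfl
termination_by (b - a).toNat
decreasing_by omega

theorem mapPair_shift1' (c : Char) (rest : List Char) (b : Int) :
    (PySem.List.pyRange 1 (b + 1) 2).map (pvPair (c :: rest)) =
      (PySem.List.pyRange 0 b 2).map (pvPair rest) := by
  have h := mapPair_shift1 c rest 0 b le_rfl
  simpa using h

theorem pvLast3_eq (l : List Char) : pvLast3 l = String.ofList (l.drop (l.length - 3)) := by
  unfold pvLast3
  rw [PySem.List.slice?_none_none_neg_one]
  simp only [Option.getD_some, PySem.List.slice_zero_start]
  rw [PySem.List.slice_to _ (by norm_num : (0:Int) ≤ 3)]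
  rw [PySem.List.slice?_none_none_neg_one]
  simp [List.take_reverse]

theorem pvChunks_nil : pvChunks [] = [] := by rw [pvChunks.eq_def]

theorem pvChunks_cons (c : Char) (rest : List Char) :
    pvChunks (c :: rest) =
      if rest.length = 2 then [String.ofList (c :: rest)]
      else String.ofList ((c :: rest).take 2) :: pvChunks (rest.drop 1) := by
  rw [pvChunks.eq_def]

theorem pvChunks_three (l : List Char) (h : l.length = 3) : pvChunks l = [String.ofList l] := by
  cases l with
  | nil => simp at h
  | cons c rest =>
    rw [pvChunks_cons, if_pos (by simp only [List.length_cons] at h; omega)]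

theorem chunks_even (l : List Char) (h : l.length % 2 = 0) :
    (PySem.List.pyRange 0 ((l.length : Int) - 1) 2).map (pvPair l) = pvChunks l := by
  match l with
  | [] => rw [pr2_nil _ _ (by simp), pvChunks_nil]; simp
  | [c] => simp at h
  | c :: c2 :: rest =>
    have hlen : (c :: c2 :: rest).length = rest.length + 2 := by simp
    have hr : rest.length % 2 = 0 := by rw [hlen] at h; omega
    have hb : ((c :: c2 :: rest).length : Int) - 1 = ((rest.length : Int) - 1) + 1 + 1 := by
      rw [hlen]; push_cast; ring
    rw [hb, pr2_cons _ _ (by omega), List.map_cons,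
        show (0:Int) + 2 = (0 + 1) + 1 by ring,
        mapPair_shift1 c (c2 :: rest) (0 + 1) ((rest.length : Int) - 1 + 1) (by omega),
        mapPair_shift1 c2 rest 0 ((rest.length : Int) - 1) (by omega),
        chunks_even rest hr]
    rw [pvChunks_cons]
    rw [if_neg (by simp only [List.length_cons]; omega)]
    simp [pvPair_zero]
termination_by l.length

theorem chunks_odd (l : List Char) (h : l.length % 2 = 1) (h3 : 3 ≤ l.length) :
    (PySem.List.pyRange 0 ((l.length : Int) - 4) 2).map (pvPair l) ++ [pvLast3 l] =
      pvChunks l := by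
  match l with
  | [] => simp at h3
  | [c] => simp at h3
  | [c, c2] => simp at h3
  | [c, c2, c3] =>
    rw [pr2_nil _ _ (by simp)]
    simp only [List.map_nil, List.nil_append]
    rw [pvLast3_eq, pvChunks_three _ (by simp)]
    simp
  | c :: c2 :: c3 :: c4 :: rest =>
    have hlen : (c :: c2 :: c3 :: c4 :: rest).length = rest.length + 4 := by simp
    have hlen2 : (c3 :: c4 :: rest).length = rest.length + 2 := by simp
    have hr : (c3 :: c4 :: rest).length % 2 = 1 := by rw [hlen] at h; rw [hlen2]; omega
    have hr3 : 3 ≤ (c3 :: c4 :: rest).length := by rw [hlen] at h; rw [hlen2]; omega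
    have hb : ((c :: c2 :: c3 :: c4 :: rest).length : Int) - 4 =
        ((((c3 :: c4 :: rest).length : Int)) - 4) + 1 + 1 := by
      rw [hlen, hlen2]; push_cast; ring
    rw [hb, pr2_cons _ _ (by rw [hlen2] at hr ⊢; omega), List.map_cons,
        show (0:Int) + 2 = (0 + 1) + 1 by ring,
        mapPair_shift1 c (c2 :: c3 :: c4 :: rest) (0 + 1) _ (by omega),
        mapPair_shift1 c2 (c3 :: c4 :: rest) 0 _ (by omega)]
    rw [pvChunks_cons]
    have hl3 : pvLast3 (c :: c2 :: c3 :: c4 :: rest) = pvLast3 (c3 :: c4 :: rest) := by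
      rw [pvLast3_eq, pvLast3_eq]
      have hd : (c :: c2 :: c3 :: c4 :: rest).length - 3 =
          ((c3 :: c4 :: rest).length - 3) + 2 := by rw [hlen, hlen2]; omega
      rw [hd]
      simp [List.drop]
    rw [hl3, List.cons_append, chunks_odd (c3 :: c4 :: rest) hr hr3]
    rw [if_neg (by simp only [List.length_cons]; omega)]
    simp [pvPair_zero]
termination_by l.length

-- ===== VERDICT (by name: the statement is the Claim_ definition above) =====
theorem getSound_spec : Claim_equal_getSound := by
  intro word _ hpre
  unfold Spec_getSound
  simp only [getSound, getSound_alt]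
  set l := word.toList with hl
  have hne : l ≠ [] := by
    intro h0
    exact hpre (by rwa [String.toList_eq_nil_iff] at h0)
  by_cases hle : ((l.length : Int)) ≤ 2
  · rw [if_pos hle, if_pos hle]
  · rw [if_neg hle, if_neg hle]
    obtain ⟨c, rest, hcr⟩ := List.exists_cons_of_ne_nil hne
    rw [hcr] at hle ⊢
    have hL : (c :: rest).length = rest.length + 1 := rfl
    rw [hL] at hle ⊢
    by_cases hpar : (((rest.length + 1 : Nat) : Int)) % 2 = 0
    · -- even length, so ≥ 4
      rw [if_pos hpar]
      by_cases hv : pyGetC (c :: rest) 0 ∈ pvVowels ∧ pyGetC (c :: rest) (-1) ∉ pvVowels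
      · rw [if_pos hv]
        rw [if_pos (⟨hv.1, Or.inr hv.2⟩ :
              pyGetC (c :: rest) 0 ∈ pvVowels ∧
                ((((rest.length + 1 : Nat) : Int)) % 2 = 1 ∨ pyGetC (c :: rest) (-1) ∉ pvVowels))]
        rw [if_neg (by omega : ¬ (((rest.length + 1 : Nat) : Int)) = 3)]
        by_cases h4 : (((rest.length + 1 : Nat) : Int)) = 4
        · rw [if_pos h4]
          rw [List.drop_one, List.tail_cons, pvChunks_three rest (by omega)]
          rw [pvLast3_eq]
          have hd : (c :: rest).length - 3 = 1 := by rw [hL]; omega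
          rw [hd]
          simp
        · rw [if_neg h4]
          rw [PySem.List.foldl_append_singleton_eq_map]
          rw [List.drop_one, List.tail_cons, ← chunks_odd rest (by omega) (by omega)]
          have hb1 : (((rest.length + 1 : Nat) : Int)) - 4 = (((rest.length : Int)) - 4) + 1 := by
            push_cast; ring
          have hl3 : pvLast3 (c :: rest) = pvLast3 rest := by
            rw [pvLast3_eq, pvLast3_eq]
            have hd : (c :: rest).length - 3 = (rest.length - 3) + 1 := by rw [hL]; omega
            rw [hd, List.drop_succ_cons]
          rw [hb1, mapPair_shift1' c rest _, hl3]
          simp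
      · rw [if_neg hv]
        rw [if_neg (by
              intro hh
              exact hv ⟨hh.1, hh.2.resolve_left (by omega)⟩)]
        rw [PySem.List.foldl_append_singleton_eq_map, List.nil_append]
        have := chunks_even (c :: rest) (by rw [hL]; omega)
        rw [hL] at this
        exact this
    · -- odd length ≥ 3
      rw [if_neg hpar]
      by_cases hv0 : pyGetC (c :: rest) 0 ∈ pvVowels
      · rw [if_pos hv0]
        rw [if_pos (⟨hv0, Or.inl (by omega)⟩ :
              pyGetC (c :: rest) 0 ∈ pvVowels ∧
                ((((rest.length + 1 : Nat) : Int)) % 2 = 1 ∨ pyGetC (c :: rest) (-1) ∉ pvVowels))]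
        rw [PySem.List.foldl_append_singleton_eq_map]
        rw [List.drop_one, List.tail_cons, ← chunks_even rest (by omega)]
        have hb1 : (((rest.length + 1 : Nat) : Int)) - 1 = (((rest.length : Int)) - 1) + 1 := by
          push_cast; ring
        rw [hb1, mapPair_shift1' c rest _]
        simp
      · rw [if_neg hv0]
        rw [if_neg (fun hh => hv0 hh.1)]
        rw [PySem.List.foldl_append_singleton_eq_map, List.nil_append]
        have := chunks_odd (c :: rest) (by rw [hL]; omega) (by rw [hL]; omega)
        rw [hL] at this
        exact this
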